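-- pv_equiv track=rewrite | github.com/TheMatt2/wordle-solver | wordle_solver.py | _result_key
-- ===== SOURCE A (Python) =====
-- def _result_key(result):
--     """Helper function to sort by largest space first"""
--     # b > y = 1 > g = 2
--     # lower is larger space
--     # (This algorithm was invented by Github Copilot)
--     space = result.count("b") + result.count("y") * 2 + result.count("g") * 4
--
--     # Use order "byg" as tie breaker
--     sort_order = []
--     for l in result:
--         if l == "b":
--             sort_order.append(0)
--         elif l == "y":
--             sort_order.append(1)
--         else:
--             sort_order.append(2)
--
--     return space, tuple(sort_order)
-- ===== SOURCE B (Python) =====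
-- def _result_key(result):
--     """Helper function to sort by largest space first (single-pass variant)."""
--     space = 0
--     sort_order = []
--     for l in result:
--         if l == "b":
--             space += 1
--             sort_order.append(0)
--         elif l == "y":
--             space += 2
--             sort_order.append(1)
--         else:
--             if l == "g":
--                 space += 4
--             sort_order.append(2)
--     return space, tuple(sort_order)
-- ===== Notes on version B (the rewrite author's own statement) =====
-- stated objective: alternative
-- what changed: Replaces the three separate count() scans plus a fourth mapping loop with a single fused pass that accumulates the space weight and the tie-break tuple together.
import Mathlib
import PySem

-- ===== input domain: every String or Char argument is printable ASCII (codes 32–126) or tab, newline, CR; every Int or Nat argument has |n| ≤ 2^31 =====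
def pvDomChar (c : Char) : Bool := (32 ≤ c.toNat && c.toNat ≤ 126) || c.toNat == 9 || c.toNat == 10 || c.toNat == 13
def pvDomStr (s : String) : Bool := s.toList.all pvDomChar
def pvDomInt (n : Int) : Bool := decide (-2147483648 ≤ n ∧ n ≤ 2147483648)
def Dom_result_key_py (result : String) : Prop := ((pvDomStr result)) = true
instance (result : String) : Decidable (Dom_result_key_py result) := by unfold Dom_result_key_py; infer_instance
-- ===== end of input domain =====

-- B fuses the three count() scans and the mapping loop into one single pass (objective: alternative decomposition, same O(n) cost).

-- ===== PORT A =====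
-- space = result.count("b") + result.count("y") * 2 + result.count("g") * 4; then a loop appending 0/1/2
def result_key_py (result : String) : Int × List Int :=
  let space : Int := (PySem.Str.count result "b" : Int)
      + (PySem.Str.count result "y" : Int) * 2
      + (PySem.Str.count result "g" : Int) * 4
  let sort_order : List Int := result.toList.foldl
      (fun acc l => acc ++ [if l == 'b' then (0 : Int) else if l == 'y' then 1 else 2]) []
  (space, sort_order)

-- ===== PORT B =====
-- single pass: accumulate (space, sort_order) together
def result_key_py_alt (result : String) : Int × List Int :=
  result.toList.foldl
    (fun (st : Int × List Int) l =>
      if l == 'b' then (st.1 + 1, st.2 ++ [0])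
      else if l == 'y' then (st.1 + 2, st.2 ++ [1])
      else ((if l == 'g' then st.1 + 4 else st.1), st.2 ++ [2]))
    (0, [])

-- ===== PRECONDITION & SPEC =====
def Spec_result_key_py (result : String) (out : Int × List Int) : Prop := out = result_key_py_alt result
instance (result : String) (out : Int × List Int) : Decidable (Spec_result_key_py result out) := by unfold Spec_result_key_py; infer_instance

-- ===== CLAIM (what is proved, stated in full; the proofs are below) =====
def Claim_equal_result_key_py : Prop := ∀ (result : String), Dom_result_key_py result → Spec_result_key_py result (result_key_py result)

-- ===== LEMMAS AND PROOFS =====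

-- Chars.count with a single-character needle is List.count
theorem pv_count_go_single (c : Char) (fuel : Nat) (l : List Char) (acc : Nat)
    (h : l.length ≤ fuel) : PySem.Chars.count.go [c] fuel l acc = acc + l.count c := by
  induction fuel generalizing l acc with
  | zero =>
    cases l with
    | nil => simp [PySem.Chars.count.go]
    | cons x t => simp at h
  | succ n ih =>
    cases l with
    | nil => simp [PySem.Chars.count.go]
    | cons x t =>
      simp only [List.length_cons, Nat.succ_le_succ_iff] at h
      by_cases hx : c = x
      · subst hx
        simp [PySem.Chars.count.go, List.isPrefixOf, ih _ _ h]
        omega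
      · simp [PySem.Chars.count.go, List.isPrefixOf, hx, ih _ _ h, Ne.symm hx]

theorem pv_count_single (s : List Char) (c : Char) :
    PySem.Chars.count s [c] = s.count c := by
  simp [PySem.Chars.count, pv_count_go_single c s.length s 0 (le_refl _)]

-- the fused single pass computes the counts and the mapped list at once
theorem pv_fused (cs : List Char) (s : Int) (acc : List Int) :
    cs.foldl
      (fun (st : Int × List Int) l =>
        if l == 'b' then (st.1 + 1, st.2 ++ [0])
        else if l == 'y' then (st.1 + 2, st.2 ++ [1])
        else ((if l == 'g' then st.1 + 4 else st.1), st.2 ++ [2]))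
      (s, acc)
    = (s + (cs.count 'b' : Int) + (cs.count 'y' : Int) * 2 + (cs.count 'g' : Int) * 4,
       acc ++ cs.map (fun l => if l == 'b' then (0 : Int) else if l == 'y' then 1 else 2)) := by
  induction cs generalizing s acc with
  | nil => simp
  | cons x t ih =>
    rw [List.foldl_cons]
    by_cases hb : x = 'b'
    · subst hb
      simp only [beq_self_eq_true, if_true]
      rw [ih]
      refine Prod.ext ?_ ?_
      · simp; ring
      · simp
    · by_cases hy : x = 'y'
      · subst hy
        simp only [show (('y' == 'b') = false) from rfl, beq_self_eq_true, if_true, if_false,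
          Bool.false_eq_true]
        rw [ih]
        refine Prod.ext ?_ ?_
        · simp; ring
        · simp
      · by_cases hg : x = 'g'
        · subst hg
          simp only [show (('g' == 'b') = false) from rfl, show (('g' == 'y') = false) from rfl,
            beq_self_eq_true, if_true, if_false, Bool.false_eq_true]
          rw [ih]
          refine Prod.ext ?_ ?_
          · simp; ring
          · simp
        · have hb' : (x == 'b') = false := by simp [hb]
          have hy' : (x == 'y') = false := by simp [hy]
          have hg' : (x == 'g') = false := by simp [hg]
          simp only [hb', hy', hg', Bool.false_eq_true, if_false]
          rw [ih]
          refine Prod.ext ?_ ?_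
          · simp [hb, hy, hg]
          · simp [hb, hy]

-- A's append loop is a map
theorem pv_append_map (cs : List Char) (acc : List Int) :
    cs.foldl (fun acc l => acc ++ [if l == 'b' then (0 : Int) else if l == 'y' then 1 else 2]) acc
      = acc ++ cs.map (fun l => if l == 'b' then (0 : Int) else if l == 'y' then 1 else 2) := by
  induction cs generalizing acc with
  | nil => simp
  | cons x t ih => rw [List.foldl_cons, ih]; simp

-- ===== VERDICT (by name: the statement is the Claim_ definition above) =====
theorem result_key_py_spec : Claim_equal_result_key_py := by
  intro result _
  unfold Spec_result_key_py result_key_py result_key_py_alt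
  have hb : ("b" : String).toList = ['b'] := rfl
  have hy : ("y" : String).toList = ['y'] := rfl
  have hg : ("g" : String).toList = ['g'] := rfl
  rw [pv_fused, pv_append_map]
  simp [PySem.Str.count_eq, hb, hy, hg, pv_count_single]
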